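-- pv_equiv track=rewrite | github.com/Tahmwellrups/six_men_morris | six_men_morris.py | get_new_piece_moves
-- ===== SOURCE A (Python) =====
-- ROW_COUNT = 5
--
-- COLUMN_COUNT = 5
--
-- def get_new_piece_moves(board, piece):
--     # Check for existing pieces that can be moved
--     possible_moves = []
--     for r in range(ROW_COUNT):
--         for c in range(COLUMN_COUNT):
--             if board[r][c] == piece:
--                 # Check all adjacent spots
--                 corners = [(0, 0), (0, 4), (4, 0), (4, 4)]
--                 vertical_middle_corners = [(0, 2), (4, 2)]
--                 horizontal_middle_corners = [(2, 0), (2, 4)]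
--                 if (r, c) in corners: # We'll be checking two steps away from the corner since, it's blocked by null space
--                     adjacent_positions = [(-2, 0), (2, 0), (0, -2), (0, 2)]
--                 elif (r, c) in vertical_middle_corners: # We'll be checking two steps away from the vertical middle corners
--                     adjacent_positions = [(-1, 0), (1, 0), (0, -2), (0, 2)]
--                 elif (r, c) in horizontal_middle_corners: # We'll be checking two steps away from the horizontal middle corners
--                     adjacent_positions = [(-2, 0), (2, 0), (0, -1), (0, 1)]
--                 else:
--                     adjacent_positions = [(-1, 0), (1, 0), (0, -1), (0, 1)]
--                 for dr, dc in adjacent_positions: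
--                     new_r, new_c = r + dr, c + dc
--                     if 0 <= new_r < ROW_COUNT and 0 <= new_c < COLUMN_COUNT and board[new_r][new_c] == 0:
--                         possible_moves.append(((r, c), (new_r, new_c)))
--     return possible_moves
-- ===== SOURCE B (Python) =====
-- EDGES = [
--     ((0, 0), (2, 0)),
--     ((0, 0), (0, 2)),
--     ((0, 1), (1, 1)),
--     ((0, 1), (0, 0)),
--     ((0, 1), (0, 2)),
--     ((0, 2), (1, 2)),
--     ((0, 2), (0, 0)),
--     ((0, 2), (0, 4)),
--     ((0, 3), (1, 3)),
--     ((0, 3), (0, 2)),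
--     ((0, 3), (0, 4)),
--     ((0, 4), (2, 4)),
--     ((0, 4), (0, 2)),
--     ((1, 0), (0, 0)),
--     ((1, 0), (2, 0)),
--     ((1, 0), (1, 1)),
--     ((1, 1), (0, 1)),
--     ((1, 1), (2, 1)),
--     ((1, 1), (1, 0)),
--     ((1, 1), (1, 2)),
--     ((1, 2), (0, 2)),
--     ((1, 2), (2, 2)),
--     ((1, 2), (1, 1)),
--     ((1, 2), (1, 3)),
--     ((1, 3), (0, 3)),
--     ((1, 3), (2, 3)),
--     ((1, 3), (1, 2)),
--     ((1, 3), (1, 4)),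
--     ((1, 4), (0, 4)),
--     ((1, 4), (2, 4)),
--     ((1, 4), (1, 3)),
--     ((2, 0), (0, 0)),
--     ((2, 0), (4, 0)),
--     ((2, 0), (2, 1)),
--     ((2, 1), (1, 1)),
--     ((2, 1), (3, 1)),
--     ((2, 1), (2, 0)),
--     ((2, 1), (2, 2)),
--     ((2, 2), (1, 2)),
--     ((2, 2), (3, 2)),
--     ((2, 2), (2, 1)),
--     ((2, 2), (2, 3)),
--     ((2, 3), (1, 3)),
--     ((2, 3), (3, 3)),
--     ((2, 3), (2, 2)),
--     ((2, 3), (2, 4)),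
--     ((2, 4), (0, 4)),
--     ((2, 4), (4, 4)),
--     ((2, 4), (2, 3)),
--     ((3, 0), (2, 0)),
--     ((3, 0), (4, 0)),
--     ((3, 0), (3, 1)),
--     ((3, 1), (2, 1)),
--     ((3, 1), (4, 1)),
--     ((3, 1), (3, 0)),
--     ((3, 1), (3, 2)),
--     ((3, 2), (2, 2)),
--     ((3, 2), (4, 2)),
--     ((3, 2), (3, 1)),
--     ((3, 2), (3, 3)),
--     ((3, 3), (2, 3)),
--     ((3, 3), (4, 3)),
--     ((3, 3), (3, 2)),
--     ((3, 3), (3, 4)),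
--     ((3, 4), (2, 4)),
--     ((3, 4), (4, 4)),
--     ((3, 4), (3, 3)),
--     ((4, 0), (2, 0)),
--     ((4, 0), (4, 2)),
--     ((4, 1), (3, 1)),
--     ((4, 1), (4, 0)),
--     ((4, 1), (4, 2)),
--     ((4, 2), (3, 2)),
--     ((4, 2), (4, 0)),
--     ((4, 2), (4, 4)),
--     ((4, 3), (3, 3)),
--     ((4, 3), (4, 2)),
--     ((4, 3), (4, 4)),
--     ((4, 4), (2, 4)),
--     ((4, 4), (4, 2)),
-- ]
--
-- def get_new_piece_moves(board, piece):
--     # One flat filter over the static directed-edge list of the board graph,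
--     # in the same global order A emits moves.
--     return [(src, dst) for src, dst in EDGES
--             if board[src[0]][src[1]] == piece and board[dst[0]][dst[1]] == 0]
-- ===== Notes on version B (the rewrite author's own statement) =====
-- stated objective: simpler
-- what changed: Replaces the nested row/column scan with its per-cell positional case analysis (corner/middle-corner offset lists plus runtime bounds checks) by a single filter over a precomputed flat list of all 80 directed board edges in A's emission order, keeping only edges whose source holds the piece and whose target is empty.
-- outside the precondition, e.g. on get_new_piece_moves([[0, 0, 0], [0, 0, 0]], 1): A raises IndexError, B raises IndexError
import Mathlib
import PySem

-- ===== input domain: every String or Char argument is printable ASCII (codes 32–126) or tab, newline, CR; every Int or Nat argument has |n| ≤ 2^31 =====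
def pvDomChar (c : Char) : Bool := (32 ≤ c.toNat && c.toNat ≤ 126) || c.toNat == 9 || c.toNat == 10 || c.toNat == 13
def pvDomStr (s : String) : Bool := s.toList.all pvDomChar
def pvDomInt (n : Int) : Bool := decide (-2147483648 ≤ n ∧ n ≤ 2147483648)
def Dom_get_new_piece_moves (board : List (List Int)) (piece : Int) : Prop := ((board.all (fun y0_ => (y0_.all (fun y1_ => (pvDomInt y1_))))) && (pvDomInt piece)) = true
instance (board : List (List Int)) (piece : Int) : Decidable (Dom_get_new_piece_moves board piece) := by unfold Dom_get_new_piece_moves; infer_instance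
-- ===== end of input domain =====

-- B replaces the nested scan with positional case analysis by one filter over a static
-- flat list of all directed board edges in A's emission order; objective: simpler.

-- board[r][c] (both Pythons index the same way; default unreachable inside Pre_)
def pvCell (board : List (List Int)) (r c : Int) : Int :=
  PySem.List.pyGetD (PySem.List.pyGetD board r []) c 0

-- ===== PORT A =====
def get_new_piece_moves (board : List (List Int)) (piece : Int) : List ((Int × Int) × (Int × Int)) :=
  (PySem.List.pyRange 0 5 1).foldl (fun acc r =>
    (PySem.List.pyRange 0 5 1).foldl (fun acc c =>
      if pvCell board r c = piece then
        let corners : List (Int × Int) := [(0, 0), (0, 4), (4, 0), (4, 4)]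
        let vertical_middle_corners : List (Int × Int) := [(0, 2), (4, 2)]
        let horizontal_middle_corners : List (Int × Int) := [(2, 0), (2, 4)]
        let adjacent_positions : List (Int × Int) :=
          if (r, c) ∈ corners then [(-2, 0), (2, 0), (0, -2), (0, 2)]
          else if (r, c) ∈ vertical_middle_corners then [(-1, 0), (1, 0), (0, -2), (0, 2)]
          else if (r, c) ∈ horizontal_middle_corners then [(-2, 0), (2, 0), (0, -1), (0, 1)]
          else [(-1, 0), (1, 0), (0, -1), (0, 1)]
        adjacent_positions.foldl (fun acc2 d =>
          let new_r := r + d.1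
          let new_c := c + d.2
          if 0 ≤ new_r ∧ new_r < 5 ∧ 0 ≤ new_c ∧ new_c < 5 ∧ pvCell board new_r new_c = 0 then
            acc2 ++ [((r, c), (new_r, new_c))]
          else acc2) acc
      else acc) acc) []

-- ===== PORT B =====
-- the module-level EDGES list of Source B: all 80 directed edges of the board graph
def pvEDGES : List ((Int × Int) × (Int × Int)) := [
  (((0:Int),(0:Int)), ((2:Int),(0:Int))),
  (((0:Int),(0:Int)), ((0:Int),(2:Int))),
  (((0:Int),(1:Int)), ((1:Int),(1:Int))),
  (((0:Int),(1:Int)), ((0:Int),(0:Int))),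
  (((0:Int),(1:Int)), ((0:Int),(2:Int))),
  (((0:Int),(2:Int)), ((1:Int),(2:Int))),
  (((0:Int),(2:Int)), ((0:Int),(0:Int))),
  (((0:Int),(2:Int)), ((0:Int),(4:Int))),
  (((0:Int),(3:Int)), ((1:Int),(3:Int))),
  (((0:Int),(3:Int)), ((0:Int),(2:Int))),
  (((0:Int),(3:Int)), ((0:Int),(4:Int))),
  (((0:Int),(4:Int)), ((2:Int),(4:Int))),
  (((0:Int),(4:Int)), ((0:Int),(2:Int))),
  (((1:Int),(0:Int)), ((0:Int),(0:Int))),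
  (((1:Int),(0:Int)), ((2:Int),(0:Int))),
  (((1:Int),(0:Int)), ((1:Int),(1:Int))),
  (((1:Int),(1:Int)), ((0:Int),(1:Int))),
  (((1:Int),(1:Int)), ((2:Int),(1:Int))),
  (((1:Int),(1:Int)), ((1:Int),(0:Int))),
  (((1:Int),(1:Int)), ((1:Int),(2:Int))),
  (((1:Int),(2:Int)), ((0:Int),(2:Int))),
  (((1:Int),(2:Int)), ((2:Int),(2:Int))),
  (((1:Int),(2:Int)), ((1:Int),(1:Int))),
  (((1:Int),(2:Int)), ((1:Int),(3:Int))),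
  (((1:Int),(3:Int)), ((0:Int),(3:Int))),
  (((1:Int),(3:Int)), ((2:Int),(3:Int))),
  (((1:Int),(3:Int)), ((1:Int),(2:Int))),
  (((1:Int),(3:Int)), ((1:Int),(4:Int))),
  (((1:Int),(4:Int)), ((0:Int),(4:Int))),
  (((1:Int),(4:Int)), ((2:Int),(4:Int))),
  (((1:Int),(4:Int)), ((1:Int),(3:Int))),
  (((2:Int),(0:Int)), ((0:Int),(0:Int))),
  (((2:Int),(0:Int)), ((4:Int),(0:Int))),
  (((2:Int),(0:Int)), ((2:Int),(1:Int))),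
  (((2:Int),(1:Int)), ((1:Int),(1:Int))),
  (((2:Int),(1:Int)), ((3:Int),(1:Int))),
  (((2:Int),(1:Int)), ((2:Int),(0:Int))),
  (((2:Int),(1:Int)), ((2:Int),(2:Int))),
  (((2:Int),(2:Int)), ((1:Int),(2:Int))),
  (((2:Int),(2:Int)), ((3:Int),(2:Int))),
  (((2:Int),(2:Int)), ((2:Int),(1:Int))),
  (((2:Int),(2:Int)), ((2:Int),(3:Int))),
  (((2:Int),(3:Int)), ((1:Int),(3:Int))),
  (((2:Int),(3:Int)), ((3:Int),(3:Int))),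
  (((2:Int),(3:Int)), ((2:Int),(2:Int))),
  (((2:Int),(3:Int)), ((2:Int),(4:Int))),
  (((2:Int),(4:Int)), ((0:Int),(4:Int))),
  (((2:Int),(4:Int)), ((4:Int),(4:Int))),
  (((2:Int),(4:Int)), ((2:Int),(3:Int))),
  (((3:Int),(0:Int)), ((2:Int),(0:Int))),
  (((3:Int),(0:Int)), ((4:Int),(0:Int))),
  (((3:Int),(0:Int)), ((3:Int),(1:Int))),
  (((3:Int),(1:Int)), ((2:Int),(1:Int))),
  (((3:Int),(1:Int)), ((4:Int),(1:Int))),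
  (((3:Int),(1:Int)), ((3:Int),(0:Int))),
  (((3:Int),(1:Int)), ((3:Int),(2:Int))),
  (((3:Int),(2:Int)), ((2:Int),(2:Int))),
  (((3:Int),(2:Int)), ((4:Int),(2:Int))),
  (((3:Int),(2:Int)), ((3:Int),(1:Int))),
  (((3:Int),(2:Int)), ((3:Int),(3:Int))),
  (((3:Int),(3:Int)), ((2:Int),(3:Int))),
  (((3:Int),(3:Int)), ((4:Int),(3:Int))),
  (((3:Int),(3:Int)), ((3:Int),(2:Int))),
  (((3:Int),(3:Int)), ((3:Int),(4:Int))),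
  (((3:Int),(4:Int)), ((2:Int),(4:Int))),
  (((3:Int),(4:Int)), ((4:Int),(4:Int))),
  (((3:Int),(4:Int)), ((3:Int),(3:Int))),
  (((4:Int),(0:Int)), ((2:Int),(0:Int))),
  (((4:Int),(0:Int)), ((4:Int),(2:Int))),
  (((4:Int),(1:Int)), ((3:Int),(1:Int))),
  (((4:Int),(1:Int)), ((4:Int),(0:Int))),
  (((4:Int),(1:Int)), ((4:Int),(2:Int))),
  (((4:Int),(2:Int)), ((3:Int),(2:Int))),
  (((4:Int),(2:Int)), ((4:Int),(0:Int))),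
  (((4:Int),(2:Int)), ((4:Int),(4:Int))),
  (((4:Int),(3:Int)), ((3:Int),(3:Int))),
  (((4:Int),(3:Int)), ((4:Int),(2:Int))),
  (((4:Int),(3:Int)), ((4:Int),(4:Int))),
  (((4:Int),(4:Int)), ((2:Int),(4:Int))),
  (((4:Int),(4:Int)), ((4:Int),(2:Int)))
]

def get_new_piece_moves_alt (board : List (List Int)) (piece : Int) : List ((Int × Int) × (Int × Int)) :=
  pvEDGES.filter (fun m =>
    decide (pvCell board m.1.1 m.1.2 = piece) && decide (pvCell board m.2.1 m.2.2 = 0))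

-- ===== PRECONDITION & SPEC =====
-- Pre_ excludes exactly the boards on which Python A raises IndexError: fewer than 5 rows,
-- or one of the first 5 rows shorter than 5.
def Pre_get_new_piece_moves (board : List (List Int)) (_piece : Int) : Prop :=
  5 ≤ board.length ∧ ∀ row ∈ board.take 5, 5 ≤ row.length
instance (board : List (List Int)) (piece : Int) : Decidable (Pre_get_new_piece_moves board piece) := by unfold Pre_get_new_piece_moves; infer_instance

def pvWitness_get_new_piece_moves : List (List Int) × Int :=
  ([[1,0,0,0,1],[0,0,0,0,0],[0,0,2,0,0],[0,0,0,0,0],[1,0,0,0,1]], 1)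

def Spec_get_new_piece_moves (board : List (List Int)) (piece : Int) (out : List ((Int × Int) × (Int × Int))) : Prop := out = get_new_piece_moves_alt board piece
instance (board : List (List Int)) (piece : Int) (out : List ((Int × Int) × (Int × Int))) : Decidable (Spec_get_new_piece_moves board piece out) := by unfold Spec_get_new_piece_moves; infer_instance

-- ===== CLAIM =====
def Claim_equal_get_new_piece_moves : Prop := ∀ (board : List (List Int)) (piece : Int), Dom_get_new_piece_moves board piece → Pre_get_new_piece_moves board piece → Spec_get_new_piece_moves board piece (get_new_piece_moves board piece)

-- ===== LEMMAS AND PROOFS =====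
-- proof-only helpers: the cell list, A's offset choice, in-bounds neighbours, per-cell moves
def pvCells : List (Int × Int) :=
  [(0,0),(0,1),(0,2),(0,3),(0,4),
   (1,0),(1,1),(1,2),(1,3),(1,4),
   (2,0),(2,1),(2,2),(2,3),(2,4),
   (3,0),(3,1),(3,2),(3,3),(3,4),
   (4,0),(4,1),(4,2),(4,3),(4,4)]

def pvOffs (rc : Int × Int) : List (Int × Int) :=
  if rc ∈ ([(0, 0), (0, 4), (4, 0), (4, 4)] : List (Int × Int)) then [(-2, 0), (2, 0), (0, -2), (0, 2)]
  else if rc ∈ ([(0, 2), (4, 2)] : List (Int × Int)) then [(-1, 0), (1, 0), (0, -2), (0, 2)]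
  else if rc ∈ ([(2, 0), (2, 4)] : List (Int × Int)) then [(-2, 0), (2, 0), (0, -1), (0, 1)]
  else [(-1, 0), (1, 0), (0, -1), (0, 1)]

def pvNbr (rc : Int × Int) : List (Int × Int) :=
  (pvOffs rc).filterMap (fun d =>
    if 0 ≤ rc.1 + d.1 ∧ rc.1 + d.1 < 5 ∧ 0 ≤ rc.2 + d.2 ∧ rc.2 + d.2 < 5 then
      some (rc.1 + d.1, rc.2 + d.2) else none)

def pvCellMoves (board : List (List Int)) (piece : Int) (rc : Int × Int) :
    List ((Int × Int) × (Int × Int)) :=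
  if pvCell board rc.1 rc.2 = piece then
    ((pvNbr rc).filter (fun n => decide (pvCell board n.1 n.2 = 0))).map (fun n => (rc, n))
  else []

-- A's inner offset loop, characterised generically
theorem pv_inner_char (board : List (List Int)) (r c : Int) (offs : List (Int × Int))
    (acc : List ((Int × Int) × (Int × Int))) :
    offs.foldl (fun acc2 d =>
      let new_r := r + d.1
      let new_c := c + d.2
      if 0 ≤ new_r ∧ new_r < 5 ∧ 0 ≤ new_c ∧ new_c < 5 ∧ pvCell board new_r new_c = 0 then
        acc2 ++ [((r, c), (new_r, new_c))]
      else acc2) acc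
    = acc ++ ((offs.filterMap (fun d =>
          if 0 ≤ r + d.1 ∧ r + d.1 < 5 ∧ 0 ≤ c + d.2 ∧ c + d.2 < 5 then
            some (r + d.1, c + d.2) else none)).filter
          (fun n => decide (pvCell board n.1 n.2 = 0))).map (fun n => (((r, c) : Int × Int), n)) := by
  induction offs generalizing acc with
  | nil => simp
  | cons d t ih =>
    simp only [List.foldl_cons, List.filterMap_cons]
    by_cases hb : 0 ≤ r + d.1 ∧ r + d.1 < 5 ∧ 0 ≤ c + d.2 ∧ c + d.2 < 5
    · obtain ⟨h1, h2, h3, h4⟩ := hb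
      by_cases he : pvCell board (r + d.1) (c + d.2) = 0
      · simp [h1, h2, h3, h4, he, ih]
      · simp [h1, h2, h3, h4, he, ih]
    · have hb' : ¬(0 ≤ r + d.1 ∧ r + d.1 < 5 ∧ 0 ≤ c + d.2 ∧ c + d.2 < 5 ∧
          pvCell board (r + d.1) (c + d.2) = 0) := fun h =>
        hb ⟨h.1, h.2.1, h.2.2.1, h.2.2.2.1⟩
      simp only [if_neg hb, if_neg hb']
      exact ih acc

-- A's per-cell body equals pvCellMoves
theorem pv_cell_step (board : List (List Int)) (piece : Int) (r c : Int)
    (acc : List ((Int × Int) × (Int × Int))) :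
    (if pvCell board r c = piece then
        (pvOffs (r, c)).foldl (fun acc2 d =>
          let new_r := r + d.1
          let new_c := c + d.2
          if 0 ≤ new_r ∧ new_r < 5 ∧ 0 ≤ new_c ∧ new_c < 5 ∧ pvCell board new_r new_c = 0 then
            acc2 ++ [((r, c), (new_r, new_c))]
          else acc2) acc
      else acc)
    = acc ++ pvCellMoves board piece (r, c) := by
  by_cases hp : pvCell board r c = piece
  · rw [if_pos hp, pv_inner_char]
    simp [pvCellMoves, pvNbr, hp]
  · simp [pvCellMoves, hp]

theorem pv_filter_flatMap {α β : Type} (l : List α) (g : α → List β) (p : β → Bool) :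
    (l.flatMap g).filter p = l.flatMap (fun x => (g x).filter p) := by
  induction l with
  | nil => simp
  | cons x t ih => simp [List.filter_append, ih]

theorem pv_cell_filter (board : List (List Int)) (piece : Int) (rc : Int × Int) :
    ((pvNbr rc).map (fun n => (rc, n))).filter
      (fun m => decide (pvCell board m.1.1 m.1.2 = piece) && decide (pvCell board m.2.1 m.2.2 = 0))
    = pvCellMoves board piece rc := by
  by_cases hp : pvCell board rc.1 rc.2 = piece
  · simp [pvCellMoves, hp, List.filter_map, Function.comp_def]
  · simp [pvCellMoves, hp, List.filter_map, Function.comp_def]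

theorem pv_A_eq (board : List (List Int)) (piece : Int) :
    get_new_piece_moves board piece = pvCells.flatMap (pvCellMoves board piece) := by
  unfold get_new_piece_moves
  rw [show PySem.List.pyRange 0 5 1 = ([0, 1, 2, 3, 4] : List Int) from by decide]
  rw [PySem.List.foldl_congr_mem
      (g := fun acc r => acc ++ (([0, 1, 2, 3, 4] : List Int).flatMap
        (fun c => pvCellMoves board piece (r, c))))]
  · rw [PySem.List.foldl_append_eq_flatMap]
    simp only [pvCells, List.flatMap_cons, List.flatMap_nil, List.append_nil,
      List.append_assoc, List.nil_append]
  · intro acc r _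
    rw [PySem.List.foldl_congr_mem
        (g := fun acc2 c => acc2 ++ pvCellMoves board piece (r, c))]
    · rw [PySem.List.foldl_append_eq_flatMap]
    · intro acc2 c _
      exact pv_cell_step board piece r c acc2

theorem pv_B_eq (board : List (List Int)) (piece : Int) :
    get_new_piece_moves_alt board piece = pvCells.flatMap (pvCellMoves board piece) := by
  unfold get_new_piece_moves_alt
  rw [show pvEDGES = pvCells.flatMap (fun rc => (pvNbr rc).map (fun n => (rc, n))) from by decide]
  rw [pv_filter_flatMap]
  simp only [pv_cell_filter]

-- ===== VERDICT =====
theorem get_new_piece_moves_spec : Claim_equal_get_new_piece_moves := by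
  intro board piece _ _
  exact (pv_A_eq board piece).trans (pv_B_eq board piece).symm
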